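-- pv_equiv track=rewrite | github.com/astryx-ai/astryx-ai-microservice-v2 | app/agent_tools/formatter.py | _normalize_markdown_spacing
-- ===== SOURCE A (Python) =====
-- def _normalize_markdown_spacing(content: str) -> str:
--     """Normalize markdown spacing: blank line before/after headings and collapse excessive blank lines."""
--     lines = content.split('\n')
--     normalized_lines = []
--     i = 0
--     while i < len(lines):
--         line = lines[i]
--         is_heading = line.lstrip().startswith('#') and line.lstrip().split(' ')[0].count('#') <= 6
--         if is_heading:
--             # Ensure blank line before heading
--             if normalized_lines and normalized_lines[-1].strip() != '':
--                 normalized_lines.append('')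
--             normalized_lines.append(line.rstrip())
--             # Ensure blank line after heading (if next is not blank or end)
--             next_line = lines[i + 1] if i + 1 < len(lines) else None
--             if next_line is not None and next_line.strip() != '':
--                 normalized_lines.append('')
--         else:
--             normalized_lines.append(line.rstrip())
--         i += 1
--     # Collapse 3+ blank lines to max 2
--     out = []
--     blank_streak = 0
--     for l in normalized_lines:
--         if l.strip() == '':
--             blank_streak += 1
--             if blank_streak <= 2:
--                 out.append('')
--         else:
--             blank_streak = 0
--             out.append(l)
--     return '\n'.join(out).strip() + '\n'
-- ===== SOURCE B (Python) =====
-- def _normalize_markdown_spacing(content: str) -> str: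
--     """Normalize markdown spacing: blank line before/after headings and collapse excessive blank lines."""
--     def is_heading(line):
--         s = line.lstrip()
--         return s.startswith('#') and s.split(' ')[0].count('#') <= 6
--
--     out = []
--     prev_heading, prev_blank = False, True
--     for line in content.split('\n'):
--         h = is_heading(line)
--         blank = not line.strip()
--         if not blank and (prev_heading or (h and not prev_blank)):
--             out.append('')  # separator blank next to a heading; always follows a non-blank line
--         if not (blank and out[-2:] == ['', '']):
--             out.append(line.rstrip())  # a blank line rstrips to ''; drop it only past two trailing blanks
--         prev_heading, prev_blank = h, blank
--     return '\n'.join(out).strip() + '\n'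
-- ===== Notes on version B (the rewrite author's own statement) =====
-- stated objective: faster
-- what changed: A's two sequential passes (stateful heading-spacing pass building an intermediate list, then a blank-streak collapse pass) are fused into one streaming loop that carries only (prev_heading, prev_blank) flags, emits separator blanks from those flags instead of re-reading its own output, and collapses blanks by a tail check on the output list.
import Mathlib
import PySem

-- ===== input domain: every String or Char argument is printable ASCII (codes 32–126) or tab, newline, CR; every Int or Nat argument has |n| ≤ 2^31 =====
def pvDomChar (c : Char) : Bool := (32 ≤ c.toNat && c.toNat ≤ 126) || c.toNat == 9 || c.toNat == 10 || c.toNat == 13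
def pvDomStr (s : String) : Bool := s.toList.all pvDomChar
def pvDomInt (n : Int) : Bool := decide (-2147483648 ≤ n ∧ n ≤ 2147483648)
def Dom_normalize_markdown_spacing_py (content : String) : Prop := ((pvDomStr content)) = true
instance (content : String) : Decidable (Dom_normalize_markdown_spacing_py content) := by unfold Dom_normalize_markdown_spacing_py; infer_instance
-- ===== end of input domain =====

-- B is a single fused streaming pass (no intermediate list, one heading test per line) instead of A's
-- two sequential passes; measured modestly faster, return values proved equal on all of Dom.

-- B fuses A's two passes into one streaming loop (no intermediate list, one heading test per line,
-- collapse done by a tail check on the output); return values proved equal on all of Dom.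
-- ===== PORT A =====
-- the heading test `line.lstrip().startswith('#') and line.lstrip().split(' ')[0].count('#') <= 6`,
-- textually identical in both Python sources (A inlines it, Source B has it as a local def)
def pyIsHeading (line : List Char) : Bool :=
  PySem.Chars.startswith (PySem.Chars.lstrip line) ['#'] &&
  decide (PySem.Chars.count ((PySem.Chars.splitOn (PySem.Chars.lstrip line) [' ']).headD []) ['#'] ≤ 6)

-- A's first pass: the `while i < len(lines)` loop building `normalized_lines`
def pyNormLoop (lines : List (List Char)) (acc : List (List Char)) : List (List Char) :=
  match lines with
  | [] => acc
  | line :: rest =>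
    if pyIsHeading line then
      -- blank line before heading: `if normalized_lines and normalized_lines[-1].strip() != ''`
      let acc := if (match acc.getLast? with
                     | some t => decide (PySem.Chars.strip t ≠ [])
                     | none => false) then acc ++ [[]] else acc
      let acc := acc ++ [PySem.Chars.rstrip line]
      -- blank line after heading: `next_line = lines[i+1] if i + 1 < len(lines) else None`
      let acc := match rest.head? with
        | some nx => if decide (PySem.Chars.strip nx ≠ []) then acc ++ [[]] else acc
        | none => acc
      pyNormLoop rest acc
    else
      pyNormLoop rest (acc ++ [PySem.Chars.rstrip line])

-- A's second pass: one step of the `for l in normalized_lines` collapse loop, state (blank_streak, out)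
def pyCollapseStep (st : Int × List (List Char)) (l : List Char) : Int × List (List Char) :=
  if PySem.Chars.strip l = [] then
    (st.1 + 1, if st.1 + 1 ≤ 2 then st.2 ++ [[]] else st.2)
  else
    (0, st.2 ++ [l])

def normalize_markdown_spacing_py (content : String) : String :=
  let lines := PySem.Chars.splitOn content.toList ['\n']
  let normalized := pyNormLoop lines []
  let out := (normalized.foldl pyCollapseStep ((0 : Int), [])).2
  String.ofList (PySem.Chars.strip (PySem.Chars.join ['\n'] out) ++ ['\n'])

-- ===== PORT B =====
-- `out[-2:] == ['', '']`
def altTail2 (out : List (List Char)) : Bool :=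
  PySem.List.slice out (some (-2)) none == [([] : List Char), []]

-- Source B's single loop over the lines, carrying (prev_heading, prev_blank)
def altLoop (ph pb : Bool) (lines : List (List Char)) (out : List (List Char)) : List (List Char) :=
  match lines with
  | [] => out
  | line :: rest =>
    let h := pyIsHeading line
    let blank := decide (PySem.Chars.strip line = [])
    let out := if !blank && (ph || (h && !pb)) then out ++ [[]] else out
    let out := if blank && altTail2 out then out else out ++ [PySem.Chars.rstrip line]
    altLoop h blank rest out

def normalize_markdown_spacing_py_alt (content : String) : String :=
  let out := altLoop false true (PySem.Chars.splitOn content.toList ['\n']) []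
  String.ofList (PySem.Chars.strip (PySem.Chars.join ['\n'] out) ++ ['\n'])

-- ===== PRECONDITION & SPEC =====
def Spec_normalize_markdown_spacing_py (content : String) (out : String) : Prop := out = normalize_markdown_spacing_py_alt content
instance (content : String) (out : String) : Decidable (Spec_normalize_markdown_spacing_py content out) := by unfold Spec_normalize_markdown_spacing_py; infer_instance

-- ===== CLAIM (what is proved, stated in full; the proofs are below) =====
def Claim_equal_normalize_markdown_spacing_py : Prop := ∀ (content : String), Dom_normalize_markdown_spacing_py content → Spec_normalize_markdown_spacing_py content (normalize_markdown_spacing_py content)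

-- ===== LEMMAS AND PROOFS =====

-- `line.strip() == ''` as a Bool
def blkB (l : List Char) : Bool := decide (PySem.Chars.strip l = [])

-- "the previous line is a non-heading, non-blank line" — A's blank-before-heading test, expressed on the line itself
def preB : Option (List Char) → Bool
  | some p => !pyIsHeading p && !blkB p
  | none => false

-- A's emissions of one line, grouped as A groups them (blank-before, the line, blank-after by lookahead)
def flatA : Option (List Char) → List (List Char) → List (List Char)
  | _, [] => []
  | prev?, l :: rest =>
    (if pyIsHeading l then
      (if preB prev? then [[]] else [])
      ++ [PySem.Chars.rstrip l]
      ++ (match rest.head? with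
          | some nx => if !blkB nx then [[]] else []
          | none => [])
     else [PySem.Chars.rstrip l]) ++ flatA (some l) rest

-- the same stream regrouped as Source B emits it: each separator blank attached to the line it precedes
def flatE (ph pb : Bool) : List (List Char) → List (List Char)
  | [] => []
  | l :: rest =>
    (if !blkB l && (ph || (pyIsHeading l && !pb)) then [[]] else []) ++ [PySem.Chars.rstrip l]
      ++ flatE (pyIsHeading l) (blkB l) rest

-- number of trailing blank entries of the output list
def tb (out : List (List Char)) : Nat := (out.reverse.takeWhile (fun x => x == ([] : List Char))).length

theorem allsp_lstrip (l : List Char) :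
    (∀ x ∈ PySem.Chars.lstrip l, PySem.Chars.isspace x) ↔ ∀ x ∈ l, PySem.Chars.isspace x := by
  simp only [PySem.Chars.lstrip]
  constructor
  · intro h x hx
    have hx' : x ∈ l.takeWhile PySem.Chars.isspace ++ l.dropWhile PySem.Chars.isspace := by
      rw [List.takeWhile_append_dropWhile]; exact hx
    rcases List.mem_append.mp hx' with h1 | h2
    · exact List.mem_takeWhile_imp h1
    · exact h x h2
  · intro h x hx
    exact h x ((List.dropWhile_sublist _).mem hx)

theorem allsp_rstrip (l : List Char) :
    (∀ x ∈ PySem.Chars.rstrip l, PySem.Chars.isspace x) ↔ ∀ x ∈ l, PySem.Chars.isspace x := by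
  simp only [PySem.Chars.rstrip, List.mem_reverse]
  constructor
  · intro h x hx
    have hx' : x ∈ l.reverse := List.mem_reverse.mpr hx
    rw [← List.takeWhile_append_dropWhile (p := PySem.Chars.isspace) (l := l.reverse)] at hx'
    rcases List.mem_append.mp hx' with h1 | h2
    · exact List.mem_takeWhile_imp h1
    · exact h x (by simpa using h2)
  · intro h x hx
    exact h x (List.mem_reverse.mp ((List.dropWhile_sublist _).mem hx))

theorem strip_eq_nil_iff (l : List Char) : PySem.Chars.strip l = [] ↔ ∀ x ∈ l, PySem.Chars.isspace x := by
  rw [PySem.Chars.strip, PySem.Chars.rstrip, List.reverse_eq_nil_iff, List.dropWhile_eq_nil_iff]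
  simp only [List.mem_reverse]
  rw [show (∀ x ∈ PySem.Chars.lstrip l, PySem.Chars.isspace x) ↔ _ from allsp_lstrip l]

theorem rstrip_eq_nil_iff (l : List Char) : PySem.Chars.rstrip l = [] ↔ ∀ x ∈ l, PySem.Chars.isspace x := by
  rw [PySem.Chars.rstrip, List.reverse_eq_nil_iff, List.dropWhile_eq_nil_iff]
  simp only [List.mem_reverse]

theorem strip_rstrip_eq_nil_iff (l : List Char) : PySem.Chars.strip (PySem.Chars.rstrip l) = [] ↔ PySem.Chars.strip l = [] := by
  rw [strip_eq_nil_iff, strip_eq_nil_iff, allsp_rstrip]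

theorem rstrip_eq_nil_iff_strip (l : List Char) : PySem.Chars.rstrip l = [] ↔ PySem.Chars.strip l = [] := by
  rw [rstrip_eq_nil_iff, strip_eq_nil_iff]

theorem heading_not_blank {l : List Char} (h : pyIsHeading l = true) : blkB l = false := by
  have h1 : PySem.Chars.startswith (PySem.Chars.lstrip l) ['#'] = true := by
    simp [pyIsHeading] at h; exact h.1
  have h2 : ['#'] <+: PySem.Chars.lstrip l := (PySem.Chars.startswith_iff _ _).mp h1
  have h3 : '#' ∈ l := by
    have hm : '#' ∈ PySem.Chars.lstrip l := h2.mem (List.mem_singleton.mpr rfl)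
    exact ((List.dropWhile_sublist _).mem hm : '#' ∈ l)
  simp only [blkB, decide_eq_false_iff_not]
  intro hs
  have := (strip_eq_nil_iff l).mp hs '#' h3
  simp [PySem.Chars.isspace] at this

theorem decide_strip_ne_eq_not_blkB (t : List Char) :
    decide (PySem.Chars.strip t ≠ []) = !blkB t := by simp [blkB]

theorem tb_append_blank (out : List (List Char)) : tb (out ++ [[]]) = tb out + 1 := by
  simp [tb, List.takeWhile]

theorem tb_append_nonblank {x : List Char} (hx : x ≠ []) (out : List (List Char)) : tb (out ++ [x]) = 0 := by
  simp [tb, List.takeWhile, hx]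

theorem slice_neg2 (out : List (List Char)) : PySem.List.slice out (some (-2)) none = (out.reverse.take 2).reverse := by
  rw [List.take_reverse, List.reverse_reverse]
  simp only [PySem.List.slice, PySem.List.clampIdx]
  by_cases h : out.length < 2
  · have h1 : ((out.length : Int) + (-2) < 0) := by omega
    have h2 : out.length - 2 = 0 := by omega
    simp [h1, h2]
  · have h1 : ¬ ((out.length : Int) + (-2) < 0) := by omega
    have h2 : ((out.length : Int) + (-2)).toNat = out.length - 2 := by omega
    simp only [if_pos (by omega : (-2 : Int) < 0), if_neg h1, h2]
    exact List.take_of_length_le (by simp)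

theorem altTail2_iff (out : List (List Char)) : altTail2 out = true ↔ 2 ≤ tb out := by
  rw [altTail2, slice_neg2, beq_iff_eq, tb]
  have hpal : ([([] : List Char), []]).reverse = [([] : List Char), []] := rfl
  rw [List.reverse_eq_iff, hpal]
  generalize out.reverse = r
  match r with
  | [] => simp
  | [a] => by_cases ha : a = ([] : List Char) <;> simp [List.takeWhile_cons, ha]
  | a :: b :: t =>
    by_cases ha : a = ([] : List Char) <;> by_cases hb : b = ([] : List Char) <;>
      simp [List.takeWhile_cons, ha, hb]

theorem pyNormLoop_eq_flatA : ∀ (lines : List (List Char)) (prev? : Option (List Char)) (acc : List (List Char)),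
    (prev? = none → acc = []) →
    (∀ p, prev? = some p → acc ≠ [] ∧
      (∀ l, lines.head? = some l → pyIsHeading l = true →
        ((match acc.getLast? with
          | some t => decide (PySem.Chars.strip t ≠ [])
          | none => false) = (!pyIsHeading p && !blkB p)))) →
    pyNormLoop lines acc = acc ++ flatA prev? lines := by
  intro lines
  induction lines with
  | nil => intro prev? acc _ _; simp [pyNormLoop, flatA]
  | cons l rest ih =>
    intro prev? acc hnone hsome
    by_cases hl : pyIsHeading l = true
    · -- heading line
      have hguard : (match acc.getLast? with
          | some t => decide (PySem.Chars.strip t ≠ [])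
          | none => false)
          = preB prev? := by
        cases prev? with
        | none => rw [hnone rfl]; rfl
        | some p => exact (hsome p rfl).2 l rfl hl
      have hnbl : blkB l = false := heading_not_blank hl
      simp only [pyNormLoop, if_pos hl, hguard, flatA]
      by_cases hpre : preB prev? = true <;>
        simp only [hpre, Bool.false_eq_true, if_pos (rfl : (true : Bool) = true), if_false,
          (by simpa using hpre : _)] <;>
      · cases hr : rest.head? with
        | none =>
          dsimp only
          rw [ih (some l) _ (by intro h; cases h)
            (by intro p' hp'; refine ⟨by simp, ?_⟩; intro l' hl' _; rw [hr] at hl'; cases hl')]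
          simp [List.append_assoc]
        | some nx =>
          dsimp only
          rw [decide_strip_ne_eq_not_blkB nx]
          cases hnx : blkB nx with
          | true =>
            simp only [Bool.not_true, Bool.false_eq_true, if_false]
            rw [ih (some l) _ (by intro h; cases h)
              (by intro p' hp'
                  refine ⟨by simp, ?_⟩
                  intro l' hl' hheadl'
                  rw [hr] at hl'; cases hl'
                  rw [heading_not_blank hheadl'] at hnx; cases hnx)]
            simp [List.append_assoc]
          | false =>
            simp only [Bool.not_false, if_pos (rfl : (true : Bool) = true)]
            rw [ih (some l) _ (by intro h; cases h)
              (by intro p' hp'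
                  injection hp' with hpl
                  subst hpl
                  refine ⟨by simp, ?_⟩
                  intro l' hl' hheadl'
                  simp [List.getLast?_concat, blkB, hl, show PySem.Chars.strip ([] : List Char) = [] from rfl])]
            simp [List.append_assoc]
    · -- ordinary line
      simp only [pyNormLoop, if_neg hl, flatA]
      rw [ih (some l) (acc ++ [PySem.Chars.rstrip l]) (by intro h; cases h)
        (by intro p hp
            injection hp with hpl
            subst hpl
            refine ⟨by simp, ?_⟩
            intro l' _ _
            rw [List.getLast?_concat]
            dsimp only
            rw [decide_strip_ne_eq_not_blkB, show pyIsHeading l = false by simpa using hl]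
            simp only [Bool.not_false, Bool.true_and]
            rw [show blkB (PySem.Chars.rstrip l) = blkB l from by
              simp [blkB, strip_rstrip_eq_nil_iff]])]
      simp [hl, List.append_assoc]

theorem flatA_eq_flatE : ∀ (lines : List (List Char)) (prev? : Option (List Char)),
    (match prev?, lines.head? with
     | some p, some nx => if pyIsHeading p && !blkB nx then [([] : List Char)] else []
     | _, _ => []) ++ flatA prev? lines
    = flatE (match prev? with | some p => pyIsHeading p | none => false)
            (match prev? with | some p => blkB p | none => true) lines := by
  intro lines
  induction lines with
  | nil => intro prev?; cases prev? <;> rfl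
  | cons l rest ih =>
    intro prev?
    have hrec := ih (some l)
    simp only [List.head?_cons] at hrec ⊢
    simp only [flatA, flatE]
    -- absorb the after-heading blank of l into the recursive call
    have habs : (if pyIsHeading l then
        (match rest.head? with
         | some nx => if !blkB nx then [([] : List Char)] else []
         | none => []) else []) ++ flatA (some l) rest
        = flatE (pyIsHeading l) (blkB l) rest := by
      rw [← hrec]
      congr 1
      by_cases hl : pyIsHeading l = true <;> cases hr : rest.head? <;> simp [hl]
    cases prev? with
    | none =>
      by_cases hl : pyIsHeading l = true
      · rw [← habs]
        have hnb := heading_not_blank hl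
        simp [hl, hnb, preB, List.append_assoc]
      · rw [← habs]
        simp [hl, preB]
    | some p =>
      by_cases hl : pyIsHeading l = true <;> by_cases hp : pyIsHeading p = true <;>
        by_cases hbl : blkB l = true <;> by_cases hbp : blkB p = true <;>
          rw [← habs] <;>
          first
          | (exfalso; first | exact absurd (heading_not_blank hl) (by rw [hbl]; simp)
                            | exact absurd (heading_not_blank hp) (by rw [hbp]; simp))
          | simp [hl, hp, hbl, hbp, preB, List.append_assoc]

theorem collapse_eq_altLoop : ∀ (lines : List (List Char)) (ph pb : Bool) (streak : Int) (out : List (List Char)),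
    (ph = true → pb = false) →
    (pb = false → streak = 0) →
    (0 ≤ streak) →
    (min streak 2 = min (tb out : Int) 2) →
    ((flatE ph pb lines).foldl pyCollapseStep (streak, out)).2 = altLoop ph pb lines out := by
  intro lines
  induction lines with
  | nil => intro ph pb streak out _ _ _ _; rfl
  | cons l rest ih =>
    intro ph pb streak out hpp hpb hs hmin
    simp only [flatE, altLoop, List.foldl_append, List.foldl_cons, List.foldl_nil]
    have hblk : decide (PySem.Chars.strip l = []) = blkB l := rfl
    rw [hblk]
    by_cases hb : blkB l = true
    · -- blank line: no separator; push '' unless two trailing blanks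
      have hh : pyIsHeading l = false := by
        by_contra hc
        simp only [Bool.not_eq_false] at hc
        rw [heading_not_blank hc] at hb; cases hb
      have hstrip : PySem.Chars.strip l = [] := of_decide_eq_true hb
      have hrs : PySem.Chars.rstrip l = [] := (rstrip_eq_nil_iff_strip l).mpr hstrip
      have hsep : (!blkB l && (ph || (pyIsHeading l && !pb))) = false := by simp [hb]
      rw [hsep]
      simp only [if_neg (by simp : ¬ (false = true)), Bool.false_eq_true, if_false]
      -- fold the single element rstrip l = [] through pyCollapseStep
      have hstep : pyCollapseStep (streak, out) (PySem.Chars.rstrip l)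
          = (streak + 1, if streak + 1 ≤ 2 then out ++ [[]] else out) := by
        rw [hrs, pyCollapseStep, if_pos (show PySem.Chars.strip ([] : List Char) = [] from rfl)]
      simp only [List.foldl_nil]
      rw [hstep]
      by_cases ht : altTail2 out = true
      · have h2tb : 2 ≤ tb out := (altTail2_iff out).mp ht
        have hstreak : ¬ streak + 1 ≤ 2 := by omega
        rw [if_neg hstreak]
        rw [hb, ht]
        simp only [Bool.and_self, if_pos (rfl : (true : Bool) = true)]
        exact ih (pyIsHeading l) true (streak + 1) out (fun h => by rw [hh] at h; cases h)
          (fun h => by cases h) (by omega) (by omega)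
      · have h2tb : ¬ 2 ≤ tb out := fun h => ht ((altTail2_iff out).mpr h)
        have hstreak : streak + 1 ≤ 2 := by omega
        rw [if_pos hstreak]
        have hcond : (blkB l && altTail2 out) = false := by
          have : altTail2 out = false := by simpa using ht
          simp [this]
        rw [hcond, hb]
        simp only [Bool.false_eq_true, if_false, hrs]
        exact ih (pyIsHeading l) true (streak + 1) (out ++ [[]]) (fun h => by rw [hh] at h; cases h)
          (fun h => by cases h) (by omega)
          (by rw [tb_append_blank]; push_cast; omega)
    · -- non-blank line
      have hb' : blkB l = false := by simpa using hb
      have hstrip : ¬ PySem.Chars.strip l = [] := by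
        simpa [blkB] using hb'
      have hrs : ¬ PySem.Chars.rstrip l = [] := fun h => hstrip ((rstrip_eq_nil_iff_strip l).mp h)
      have hstripr : ¬ PySem.Chars.strip (PySem.Chars.rstrip l) = [] :=
        fun h => hstrip ((strip_rstrip_eq_nil_iff l).mp h)
      have hcond2 : ∀ o, (blkB l && altTail2 o) = false := by intro o; rw [hb']; rfl
      rw [hb']
      simp only [Bool.not_false, Bool.true_and, hcond2, Bool.false_eq_true, if_false]
      by_cases hc : (ph || (pyIsHeading l && !pb)) = true
      · rw [if_pos hc, if_pos hc]
        have hpb0 : pb = false := by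
          rcases Bool.or_eq_true_iff.mp hc with h1 | h1
          · exact hpp h1
          · exact Bool.eq_false_iff.mpr (by simpa using (Bool.and_eq_true_iff.mp h1).2)
        have hs0 : streak = 0 := hpb hpb0
        simp only [List.foldl_cons, List.foldl_nil]
        have hstep1 : pyCollapseStep (streak, out) [] = (streak + 1, out ++ [[]]) := by
          rw [pyCollapseStep, if_pos (show PySem.Chars.strip ([] : List Char) = [] from rfl),
            if_pos (by omega : streak + 1 ≤ 2)]
        have hstep2 : pyCollapseStep (streak + 1, out ++ [[]]) (PySem.Chars.rstrip l)
            = (0, out ++ [[]] ++ [PySem.Chars.rstrip l]) := by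
          rw [pyCollapseStep, if_neg hstripr]
        rw [hstep1, hstep2]
        simp only [Bool.false_and, Bool.false_eq_true, if_false]
        exact ih (pyIsHeading l) false 0 (out ++ [[]] ++ [PySem.Chars.rstrip l])
          (fun _ => rfl) (fun _ => rfl) le_rfl
          (by rw [tb_append_nonblank hrs]; simp)
      · rw [if_neg hc, if_neg hc]
        simp only [List.foldl_cons, List.foldl_nil]
        have hstep2 : pyCollapseStep (streak, out) (PySem.Chars.rstrip l)
            = (0, out ++ [PySem.Chars.rstrip l]) := by
          rw [pyCollapseStep, if_neg hstripr]
        rw [hstep2]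
        simp only [Bool.false_and, Bool.false_eq_true, if_false]
        exact ih (pyIsHeading l) false 0 (out ++ [PySem.Chars.rstrip l])
          (fun _ => rfl) (fun _ => rfl) le_rfl
          (by rw [tb_append_nonblank hrs]; simp)

-- ===== VERDICT (by name: the statement is the Claim_ definition above) =====
theorem normalize_markdown_spacing_py_spec : Claim_equal_normalize_markdown_spacing_py := by
  intro content _
  unfold Spec_normalize_markdown_spacing_py normalize_markdown_spacing_py normalize_markdown_spacing_py_alt
  set lines := PySem.Chars.splitOn content.toList ['\n'] with hlines
  have h1 : pyNormLoop lines [] = flatA none lines := by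
    simpa using pyNormLoop_eq_flatA lines none [] (fun _ => rfl) (fun p hp => by cases hp)
  have h2 : flatA none lines = flatE false true lines := by
    have h := flatA_eq_flatE lines none
    have h0 : (match (none : Option (List Char)), lines.head? with
        | some p, some nx => if pyIsHeading p && !blkB nx then [([] : List Char)] else []
        | _, _ => []) = [] := by cases lines.head? <;> rfl
    rw [h0] at h
    simpa using h
  have h3 : ((flatE false true lines).foldl pyCollapseStep ((0 : Int), [])).2
      = altLoop false true lines [] :=
    collapse_eq_altLoop lines false true 0 [] (fun h => by cases h) (fun _ => rfl) le_rfl (by simp [tb])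
  simp only [h1, h2, h3]
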